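-- pv_equiv track=rewrite | github.com/SKouga0926/NLP-100 | 05/self_made_function.py | split_into_words
-- ===== SOURCE A (Python) =====
-- def split_into_words(string):
--
--     size_of_string = len(string)
--
--     word_list = []
--     word = ""
--
--     left_ptr = 0
--     right_ptr = 0
--
--     word_size_list_of_word_list = []
--
--     for i in range(size_of_string):
--
--         if (right_ptr >= size_of_string):
--             break
--
--         if (string[right_ptr] == " " or string[right_ptr] == "," or string[right_ptr] == "."):
--
--             for j in range(left_ptr, right_ptr):
--                 word = word + string[j]
--
--             word_list.append(word)
--             word_size_list_of_word_list.append(len(word))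
--             word = ""
--
--             while True:
--                 if (string[right_ptr] == " " or string[right_ptr] == "," or string[right_ptr] == "."):
--                     right_ptr += 1
--                     if (right_ptr >= size_of_string):
--                         break
--                 else :
--                     left_ptr = right_ptr
--                     break
--
--         if (right_ptr == size_of_string - 1):
--             for j in range(left_ptr, right_ptr + 1):
--                 word = word + string[j]
--
--             word_list.append(word)
--             word_size_list_of_word_list.append(len(word))
--             word = ""
--             break
--
--
--         else :
--             right_ptr += 1
--
--     return word_list
-- ===== SOURCE B (Python) =====
-- import re
--
-- def split_into_words(string):
--     if not string:
--         return []
--     return re.split(r'[ ,.]+', string.rstrip(' ,.'))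
-- ===== Notes on version B (the rewrite author's own statement) =====
-- stated objective: idiomatic
-- what changed: Replaces the manual two-pointer scan with inner character-copy and delimiter-skip loops by a single regex split on delimiter runs of the right-stripped string (with an empty-string guard).
import Mathlib
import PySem

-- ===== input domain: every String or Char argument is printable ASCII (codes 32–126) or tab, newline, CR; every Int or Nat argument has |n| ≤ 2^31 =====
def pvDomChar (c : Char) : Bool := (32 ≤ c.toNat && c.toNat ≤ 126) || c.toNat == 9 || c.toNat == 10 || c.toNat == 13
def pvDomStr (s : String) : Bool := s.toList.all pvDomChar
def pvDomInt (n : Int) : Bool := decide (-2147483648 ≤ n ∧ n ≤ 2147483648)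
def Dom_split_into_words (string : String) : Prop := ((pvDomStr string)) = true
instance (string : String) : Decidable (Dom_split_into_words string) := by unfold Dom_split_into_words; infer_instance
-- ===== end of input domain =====

-- B replaces A's manual two-pointer scan (char-by-char word rebuilding, inner skip loop) by
-- one regex split on delimiter runs of the right-stripped string; same return value everywhere.

-- ===== PORT A =====
def pvIsDelimA (c : Char) : Bool := c == ' ' || c == ',' || c == '.'

-- the inner `while True` skip loop of A: advances right past delimiters, sets left on a
-- non-delimiter, breaks when right reaches the end (s[right] only read when right < n)
def pvSkipA (s : List Char) (n left right : Nat) : Nat × Nat :=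
  if pvIsDelimA (s.getD right ' ') then
    if right + 1 ≥ n then (left, right + 1)
    else pvSkipA s n left (right + 1)
  else (right, right)
termination_by n - right
decreasing_by omega

-- the outer `for i in range(n)` loop of A, one fuel unit per iteration; the write-only
-- word_size_list_of_word_list of A is omitted (it never affects the returned value)
def pvOuterA (s : List Char) (n : Nat) : Nat → List String → Nat → Nat → List String
  | 0, wl, _, _ => wl
  | fuel + 1, wl, left, right =>
    if right ≥ n then wl
    else
      let st :=
        if pvIsDelimA (s.getD right ' ') then
          let word := (List.range' left (right - left)).foldl (fun w j => w ++ [s.getD j ' ']) []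
          let lr := pvSkipA s n left right
          (wl ++ [String.mk word], lr.1, lr.2)
        else (wl, left, right)
      if st.2.2 = n - 1 then
        let word := (List.range' st.2.1 (st.2.2 + 1 - st.2.1)).foldl (fun w j => w ++ [s.getD j ' ']) []
        st.1 ++ [String.mk word]
      else pvOuterA s n fuel st.1 st.2.1 (st.2.2 + 1)

def split_into_words (string : String) : List String :=
  pvOuterA string.toList string.toList.length string.toList.length [] 0 0

-- ===== PORT B =====
def pvIsDelimB (c : Char) : Bool := c == ' ' || c == ',' || c == '.'

-- port of string.rstrip(' ,.'): remove trailing delimiter characters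
def pvRstripB (l : List Char) : List Char := (l.reverse.dropWhile pvIsDelimB).reverse

-- hand port of re.split(r'[ ,.]+', ...) (no regex engine in Lean): exact for this pattern —
-- the segment before the first delimiter run, then recursively the segments after it
def pvSplitB (l : List Char) : List (List Char) :=
  match h : l.dropWhile (fun x => !pvIsDelimB x) with
  | [] => [l.takeWhile (fun x => !pvIsDelimB x)]
  | _ :: tl => l.takeWhile (fun x => !pvIsDelimB x) :: pvSplitB (tl.dropWhile pvIsDelimB)
termination_by l.length
decreasing_by
  have h1 : (l.dropWhile (fun x => !pvIsDelimB x)).length ≤ l.length := List.length_dropWhile_le _ _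
  rw [h] at h1
  have h2 : (tl.dropWhile pvIsDelimB).length ≤ tl.length := List.length_dropWhile_le _ _
  simp at h1
  omega

def split_into_words_alt (string : String) : List String :=
  if string = "" then []
  else (pvSplitB (pvRstripB string.toList)).map (fun w => String.mk w)

-- ===== PRECONDITION & SPEC =====
def Spec_split_into_words (string : String) (out : List String) : Prop :=
  out = split_into_words_alt string
instance (string : String) (out : List String) : Decidable (Spec_split_into_words string out) := by
  unfold Spec_split_into_words; infer_instance

-- ===== CLAIM (what is proved, stated in full; the proofs are below) =====
def Claim_equal_split_into_words : Prop :=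
  ∀ (string : String), Dom_split_into_words string → Spec_split_into_words string (split_into_words string)

-- ===== LEMMAS AND PROOFS =====

-- proof-side tokenizer: the maximal non-delimiter runs of a string (the common normal
-- form both ports are related to)
def pvFindAllB (l : List Char) : List (List Char) :=
  match h : l.dropWhile pvIsDelimB with
  | [] => []
  | c :: tl =>
      (c :: tl.takeWhile (fun x => !pvIsDelimB x)) :: pvFindAllB (tl.dropWhile (fun x => !pvIsDelimB x))
termination_by l.length
decreasing_by
  have h1 : (l.dropWhile pvIsDelimB).length ≤ l.length := List.length_dropWhile_le _ _
  rw [h] at h1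
  have h2 : (tl.dropWhile (fun x => !pvIsDelimB x)).length ≤ tl.length := List.length_dropWhile_le _ _
  simp at h1
  omega

-- A's semantics from an intermediate loop state, expressed through B's tokenizer:
-- `part` is the word collected so far (s[left..right)), `rest` the unread suffix
def pvF (part rest : List Char) : List String :=
  match rest with
  | [] => []
  | c :: _ =>
      if pvIsDelimB c then String.mk part :: (pvFindAllB rest).map (fun w => String.mk w)
      else (pvFindAllB (part ++ rest)).map (fun w => String.mk w)

theorem pvDelimAB : pvIsDelimA = pvIsDelimB := rfl

theorem pvFindAllB_nil' {l : List Char} (h : l.dropWhile pvIsDelimB = []) :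
    pvFindAllB l = [] := by
  rw [pvFindAllB]
  split
  · rfl
  · next c tl heq => rw [h] at heq; simp at heq

theorem pvFindAllB_nil : pvFindAllB [] = [] := pvFindAllB_nil' rfl

theorem pvFindAllB_cons {l : List Char} {c : Char} {tl : List Char}
    (h : l.dropWhile pvIsDelimB = c :: tl) :
    pvFindAllB l = (c :: tl.takeWhile (fun x => !pvIsDelimB x))
      :: pvFindAllB (tl.dropWhile (fun x => !pvIsDelimB x)) := by
  rw [pvFindAllB]
  split
  · next heq => rw [h] at heq; simp at heq
  · next c' tl' heq => rw [h] at heq; cases heq; rfl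

theorem pvFindAllB_congr {l₁ l₂ : List Char}
    (h : l₁.dropWhile pvIsDelimB = l₂.dropWhile pvIsDelimB) : pvFindAllB l₁ = pvFindAllB l₂ := by
  match h2 : l₂.dropWhile pvIsDelimB with
  | [] => rw [pvFindAllB_nil' (h.trans h2), pvFindAllB_nil' h2]
  | c :: tl => rw [pvFindAllB_cons (h.trans h2), pvFindAllB_cons h2]

theorem pvF_nil (part : List Char) : pvF part [] = [] := rfl

theorem pvF_cons (part : List Char) (c : Char) (tl : List Char) :
    pvF part (c :: tl) =
      if pvIsDelimB c then String.mk part :: (pvFindAllB (c :: tl)).map (fun w => String.mk w)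
      else (pvFindAllB (part ++ c :: tl)).map (fun w => String.mk w) := rfl

theorem pv_takeWhile_all {q : Char → Bool} {xs : List Char} (ys : List Char)
    (h : ∀ x ∈ xs, q x = true) : List.takeWhile q (xs ++ ys) = xs ++ List.takeWhile q ys := by
  induction xs with
  | nil => simp
  | cons a t ih =>
      simp only [List.cons_append, List.takeWhile_cons, h a (by simp), if_pos]
      simp [ih fun x hx => h x (by simp [hx])]

theorem pv_dropWhile_all {q : Char → Bool} {xs : List Char} (ys : List Char)
    (h : ∀ x ∈ xs, q x = true) : List.dropWhile q (xs ++ ys) = List.dropWhile q ys := by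
  induction xs with
  | nil => simp
  | cons a t ih =>
      simp only [List.cons_append, List.dropWhile_cons, h a (by simp), if_pos]
      exact ih fun x hx => h x (by simp [hx])

theorem pv_head_dropWhile {q : Char → Bool} {l : List Char} {x : Char} {xs : List Char}
    (h : List.dropWhile q l = x :: xs) : q x = false := by
  induction l with
  | nil => simp at h
  | cons a t ih =>
      rw [List.dropWhile_cons] at h
      by_cases hq : q a = true
      · exact ih (by simpa [hq] using h)
      · simp [hq] at h
        simp [← h.1]; simpa using hq

theorem pv_dropWhile_idem (q : Char → Bool) (l : List Char) :
    List.dropWhile q (List.dropWhile q l) = List.dropWhile q l := by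
  match h : List.dropWhile q l with
  | [] => rfl
  | x :: xs => rw [List.dropWhile_cons, pv_head_dropWhile h]; simp

-- all-non-delimiter non-empty run is a single token
theorem pvFindAllB_run {w : List Char} (hne : w ≠ [])
    (hw : ∀ x ∈ w, pvIsDelimB x = false) : pvFindAllB w = [w] := by
  match w, hne with
  | a :: t, _ =>
    have ha : pvIsDelimB a = false := hw a (by simp)
    have ht : ∀ x ∈ t, (fun x => !pvIsDelimB x) x = true := by
      intro x hx; simp [hw x (by simp [hx])]
    have hdrop : (a :: t).dropWhile pvIsDelimB = a :: t := by
      simp [List.dropWhile_cons, ha]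
    rw [pvFindAllB_cons hdrop]
    have h1 : t.takeWhile (fun x => !pvIsDelimB x) = t := List.takeWhile_eq_self_iff.mpr ht
    have h2 : t.dropWhile (fun x => !pvIsDelimB x) = [] :=
      List.dropWhile_eq_nil_iff.mpr (by intro x hx; simpa using ht x hx)
    rw [h1, h2, pvFindAllB_nil]

-- key bridging lemma: a pending non-empty word `part` followed by `rest` tokenizes as pvF says
theorem pvF_run (part rest : List Char) (hp : part ≠ [])
    (hall : ∀ x ∈ part, pvIsDelimB x = false) (hr : rest ≠ []) :
    pvF part rest = (pvFindAllB (part ++ rest)).map (fun w => String.mk w) := by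
  match rest, hr with
  | r :: rt, _ =>
    by_cases hd : pvIsDelimB r = true
    · match part, hp with
      | a :: pt, _ =>
        have ha : pvIsDelimB a = false := hall a (by simp)
        have hpt : ∀ x ∈ pt, pvIsDelimB x = false := fun x hx => hall x (by simp [hx])
        rw [pvF_cons, if_pos hd]
        have hdrop : ((a :: pt) ++ r :: rt).dropWhile pvIsDelimB = a :: (pt ++ r :: rt) := by
          simp [List.dropWhile_cons, ha]
        rw [pvFindAllB_cons hdrop]
        have htk : (pt ++ r :: rt).takeWhile (fun x => !pvIsDelimB x) = pt := by
          rw [pv_takeWhile_all _ (by intro x hx; simp [hpt x hx])]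
          simp [List.takeWhile_cons, hd]
        have hdr : (pt ++ r :: rt).dropWhile (fun x => !pvIsDelimB x) = r :: rt := by
          rw [pv_dropWhile_all _ (by intro x hx; simp [hpt x hx])]
          simp [List.dropWhile_cons, hd]
        rw [htk, hdr]
        simp
    · rw [pvF_cons, if_neg hd]

theorem pv_foldl_append (f : Nat → Char) : ∀ (xs : List Nat) (acc : List Char),
    xs.foldl (fun w j => w ++ [f j]) acc = acc ++ xs.map f := by
  intro xs
  induction xs with
  | nil => simp
  | cons a t ih => intro acc; simp [List.foldl_cons, ih]

theorem pv_range'_map (s : List Char) : ∀ (k left : Nat), left + k ≤ s.length →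
    (List.range' left k).map (fun j => s.getD j ' ') = (s.drop left).take k := by
  intro k
  induction k with
  | zero => simp
  | succ k ih =>
      intro left h
      have hl : left < s.length := by omega
      rw [List.range'_succ]
      have hcons : s.drop left = s[left] :: s.drop (left + 1) := List.drop_eq_getElem_cons hl
      simp only [List.map_cons, List.getD_eq_getElem s ' ' hl, hcons, List.take_succ_cons]
      rw [ih (left + 1) (by omega)]

theorem pv_word (s : List Char) (left k : Nat) (h : left + k ≤ s.length) :
    (List.range' left k).foldl (fun w j => w ++ [s.getD j ' ']) [] = (s.drop left).take k := by
  rw [pv_foldl_append, pv_range'_map s k left h]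
  simp

theorem pv_take_succ (s : List Char) (left k : Nat) (h : left + k < s.length) :
    (s.drop left).take (k + 1) = (s.drop left).take k ++ [s[left + k]] := by
  have hk : k < (s.drop left).length := by simp; omega
  rw [List.take_succ]
  rw [List.getElem?_eq_getElem hk]
  simp [List.getElem_drop]

-- skip-loop specification
theorem pvSkipA_spec (s : List Char) (left : Nat) : ∀ k right, k = s.length - right → right < s.length →
    right ≤ (pvSkipA s s.length left right).2 ∧
    (pvSkipA s s.length left right).2 ≤ s.length ∧
    s.drop (pvSkipA s s.length left right).2 = (s.drop right).dropWhile pvIsDelimB ∧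
    ((pvSkipA s s.length left right).2 < s.length →
      (pvSkipA s s.length left right).1 = (pvSkipA s s.length left right).2) ∧
    ((pvSkipA s s.length left right).1 = left ∨
      (pvSkipA s s.length left right).1 = (pvSkipA s s.length left right).2) := by
  intro k
  induction k using Nat.strong_induction_on with
  | _ k ih =>
    intro right hk hr
    have hgetD : s.getD right ' ' = s[right] := List.getD_eq_getElem s ' ' hr
    have hcons : s.drop right = s[right] :: s.drop (right + 1) := List.drop_eq_getElem_cons hr
    rw [pvSkipA]
    by_cases hd : pvIsDelimA (s.getD right ' ') = true
    · rw [if_pos hd]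
      have hdB : pvIsDelimB s[right] = true := by rw [← pvDelimAB, ← hgetD]; exact hd
      by_cases he : right + 1 ≥ s.length
      · rw [if_pos he]
        have hnil : s.drop (right + 1) = [] := List.drop_eq_nil_of_le (by omega)
        refine ⟨by omega, by omega, ?_, fun h => absurd h (by omega), Or.inl rfl⟩
        rw [hcons, List.dropWhile_cons]
        simp [hdB, hnil]
      · rw [if_neg he]
        have hr1 : right + 1 < s.length := by omega
        obtain ⟨h1, h2, h3, h4, h5⟩ := ih (s.length - (right + 1)) (by omega) (right + 1) rfl hr1
        refine ⟨by omega, h2, ?_, h4, h5⟩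
        rw [h3, hcons, List.dropWhile_cons]
        simp [hdB]
    · rw [if_neg hd]
      have hdB : pvIsDelimB s[right] = false := by
        rw [← pvDelimAB, ← hgetD]; simpa using hd
      refine ⟨le_refl _, by omega, ?_, fun _ => rfl, Or.inr rfl⟩
      rw [hcons, List.dropWhile_cons]
      simp [hdB]

-- main loop invariant: from state (wl, left, right) with the collected delimiter-free word
-- s[left..right), A's loop appends exactly pvF of that word and the unread suffix
theorem pvOuterA_spec (s : List Char) : ∀ fuel wl left right,
    left ≤ right → s.length - right ≤ fuel →
    (right ≤ s.length → ∀ c ∈ (s.drop left).take (right - left), pvIsDelimB c = false) →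
    pvOuterA s s.length fuel wl left right
      = wl ++ pvF ((s.drop left).take (right - left)) (s.drop right) := by
  intro fuel
  induction fuel with
  | zero =>
      intro wl left right _ hfuel _
      have hnil : s.drop right = [] := List.drop_eq_nil_of_le (by omega)
      simp [pvOuterA, hnil, pvF_nil]
  | succ f ih =>
      intro wl left right hlr hfuel hpart
      rw [pvOuterA]
      by_cases hend : right ≥ s.length
      · rw [if_pos hend]
        have hnil : s.drop right = [] := List.drop_eq_nil_of_le hend
        simp [hnil, pvF_nil]
      · have hr : right < s.length := by omega
        rw [if_neg hend]
        have hgetD : s.getD right ' ' = s[right] := List.getD_eq_getElem s ' ' hr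
        have hcons : s.drop right = s[right] :: s.drop (right + 1) := List.drop_eq_getElem_cons hr
        have hpart' := hpart (le_of_lt hr)
        by_cases hdel : pvIsDelimB s[right] = true
        · -- delimiter: flush the word, then skip the run of delimiters
          have hdA : pvIsDelimA (s.getD right ' ') = true := by
            rw [pvDelimAB, hgetD]; exact hdel
          rw [if_pos hdA]
          have hword : (List.range' left (right - left)).foldl (fun w j => w ++ [s.getD j ' ']) []
              = (s.drop left).take (right - left) := pv_word s left (right - left) (by omega)
          obtain ⟨hsk1, hsk2, hsk3, hsk4, hsk5⟩ :=
            pvSkipA_spec s left (s.length - right) right rfl hr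
          set r' := (pvSkipA s s.length left right).2 with hr'def
          set part := (s.drop left).take (right - left) with hpdef
          rw [hword]
          by_cases hlast : r' = s.length - 1
          · rw [if_pos hlast]
            have hrl : r' < s.length := by omega
            have hl' : (pvSkipA s s.length left right).1 = r' := hsk4 hrl
            have hrest : s.drop r' = s[r'] :: s.drop (r' + 1) := List.drop_eq_getElem_cons hrl
            have hnil2 : s.drop (r' + 1) = [] := List.drop_eq_nil_of_le (by omega)
            rw [hl']
            have hword2 : (List.range' r' (r' + 1 - r')).foldl (fun w j => w ++ [s.getD j ' ']) []
                = (s.drop r').take (r' + 1 - r') := pv_word s r' (r' + 1 - r') (by omega)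
            rw [hword2]
            have htake1 : (s.drop r').take (r' + 1 - r') = [s[r']] := by
              have h1 : r' + 1 - r' = 1 := by omega
              rw [h1, hrest]; rfl
            rw [htake1]
            rw [hcons, pvF_cons, if_pos hdel]
            have hdw : (s[right] :: s.drop (right + 1)).dropWhile pvIsDelimB = s[r'] :: [] := by
              rw [← hcons, ← hsk3, hrest, hnil2]
            rw [pvFindAllB_cons hdw]
            simp [pvFindAllB_nil]
          · rw [if_neg hlast]
            by_cases hrn : r' < s.length
            · -- skip stopped on a non-delimiter: continue with the fresh word [s[r']]
              have hl' : (pvSkipA s s.length left right).1 = r' := hsk4 hrn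
              have hrest : s.drop r' = s[r'] :: s.drop (r' + 1) := List.drop_eq_getElem_cons hrn
              have hdB : pvIsDelimB s[r'] = false := by
                apply pv_head_dropWhile (l := s.drop right)
                rw [← hsk3, hrest]
              have htl : s.drop (r' + 1) ≠ [] := by
                intro hc
                have := congrArg List.length hc
                simp at this
                omega
              have hpart1 : (s.drop r').take (r' + 1 - r') = [s[r']] := by
                have h1 : r' + 1 - r' = 1 := by omega
                rw [h1, hrest]; rfl
              rw [hl']
              rw [ih (wl ++ [String.mk part]) r' (r' + 1) (by omega) (by omega) ?_]
              · rw [hpart1]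
                rw [pvF_run [s[r']] (s.drop (r' + 1)) (by simp) (by simpa using hdB) htl]
                have hfa : pvFindAllB (s.drop right) = pvFindAllB ([s[r']] ++ s.drop (r' + 1)) := by
                  apply pvFindAllB_congr
                  have e1 : [s[r']] ++ s.drop (r' + 1) = s.drop r' := by rw [hrest]; rfl
                  rw [e1, hsk3, pv_dropWhile_idem]
                rw [hcons] at hfa
                rw [hcons, pvF_cons, if_pos hdel]
                rw [hfa]
                simp
              · intro _ c hc
                rw [hpart1] at hc
                simp at hc
                rw [hc]
                exact hdB
            · -- skip ran off the end: one more iteration, then the loop exits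
              have hrn' : r' = s.length := by omega
              rw [ih (wl ++ [String.mk part]) (pvSkipA s s.length left right).1 (r' + 1)
                    ?_ (by omega) ?_]
              · have hnil2 : s.drop (r' + 1) = [] := List.drop_eq_nil_of_le (by omega)
                rw [hnil2, pvF_nil]
                rw [hcons, pvF_cons, if_pos hdel]
                have hdw : (s[right] :: s.drop (right + 1)).dropWhile pvIsDelimB = [] := by
                  rw [← hcons, ← hsk3, hrn']
                  exact List.drop_eq_nil_of_le (le_refl _)
                rw [pvFindAllB_nil' hdw]
                simp
              · -- the (stale) left pointer is ≤ r' + 1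
                rcases hsk5 with h | h <;> rw [h] <;> omega
              · intro hcontra
                exact absurd hcontra (by omega)
        · -- non-delimiter: extend the word (or flush the final word at the last index)
          have hdelF : pvIsDelimB s[right] = false := by simpa using hdel
          have hdA : ¬ pvIsDelimA (s.getD right ' ') = true := by
            rw [pvDelimAB, hgetD]; simpa using hdel
          rw [if_neg hdA]
          have hext : (s.drop left).take (right + 1 - left)
              = (s.drop left).take (right - left) ++ [s[right]] := by
            have h1 : right + 1 - left = (right - left) + 1 := by omega
            have h2 : left + (right - left) = right := by omega
            rw [h1, pv_take_succ s left (right - left) (by omega)]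
            simp only [h2]
          by_cases hlast : right = s.length - 1
          · rw [if_pos hlast]
            have hword2 : (List.range' left (right + 1 - left)).foldl (fun w j => w ++ [s.getD j ' ']) []
                = (s.drop left).take (right + 1 - left) := pv_word s left (right + 1 - left) (by omega)
            rw [hword2, hext]
            have hnil2 : s.drop (right + 1) = [] := List.drop_eq_nil_of_le (by omega)
            rw [hcons, hnil2, pvF_cons, if_neg (by simp [hdel])]
            rw [pvFindAllB_run (by simp) ?_]
            · simp
            · intro x hx
              simp at hx
              rcases hx with hx | hx
              · exact hpart' x hx
              · rw [hx]; exact hdelF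
          · rw [if_neg hlast]
            have hr1 : right + 1 < s.length := by omega
            rw [ih wl left (right + 1) (by omega) (by omega) ?_]
            · rw [hext]
              have htl : s.drop (right + 1) ≠ [] := by
                intro hc
                have := congrArg List.length hc
                simp at this
                omega
              rw [pvF_run ((s.drop left).take (right - left) ++ [s[right]]) (s.drop (right + 1))
                    (by simp) ?_ htl]
              · rw [hcons, pvF_cons, if_neg (by simp [hdel])]
                have e1 : (s.drop left).take (right - left) ++ [s[right]] ++ s.drop (right + 1)
                    = (s.drop left).take (right - left) ++ s[right] :: s.drop (right + 1) := by
                  simp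
                rw [e1]
              · intro x hx
                simp at hx
                rcases hx with hx | hx
                · exact hpart' x hx
                · rw [hx]; exact hdelF
            · intro _ c hc
              rw [hext] at hc
              simp at hc
              rcases hc with hc | hc
              · exact hpart' c hc
              · rw [hc]; exact hdelF

theorem portA_eq_F (string : String) : split_into_words string = pvF [] string.toList := by
  have := pvOuterA_spec string.toList string.toList.length [] 0 0
    (Nat.le_refl 0) (by omega) (by simp)
  simpa [split_into_words] using this

-- ----- B-side lemmas: rstrip + split-on-runs agrees with A's tokenization -----

theorem pvSplitB_nil {l : List Char} (h : l.dropWhile (fun x => !pvIsDelimB x) = []) :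
    pvSplitB l = [l.takeWhile (fun x => !pvIsDelimB x)] := by
  rw [pvSplitB]
  split
  · rfl
  · next c tl heq => rw [h] at heq; simp at heq

theorem pvSplitB_cons {l : List Char} {c : Char} {tl : List Char}
    (h : l.dropWhile (fun x => !pvIsDelimB x) = c :: tl) :
    pvSplitB l = l.takeWhile (fun x => !pvIsDelimB x) :: pvSplitB (tl.dropWhile pvIsDelimB) := by
  rw [pvSplitB]
  split
  · next heq => rw [h] at heq; simp at heq
  · next c' tl' heq => rw [h] at heq; cases heq; rfl

theorem pv_getLast?_suffix {s2 l : List Char} (h : s2 <:+ l) {z : Char}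
    (hz : s2.getLast? = some z) : l.getLast? = some z := by
  obtain ⟨pre, rfl⟩ := h
  rw [List.getLast?_append, hz]
  rfl

theorem pv_getLast?_some (a : Char) (t : List Char) :
    ∃ z, (a :: t).getLast? = some z ∧ z ∈ a :: t := by
  rw [List.getLast?_eq_head?_reverse]
  cases hrev : (a :: t).reverse with
  | nil => exact absurd (congrArg List.length hrev) (by simp)
  | cons y ys =>
      refine ⟨y, rfl, ?_⟩
      have : y ∈ (a :: t).reverse := by rw [hrev]; simp
      exact List.mem_reverse.mp this

-- appending delimiters never changes the non-delimiter runs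
theorem pv_findall_absorb : ∀ (n : Nat) (r ds : List Char), r.length ≤ n →
    (∀ x ∈ ds, pvIsDelimB x = true) → pvFindAllB (r ++ ds) = pvFindAllB r := by
  intro n
  induction n with
  | zero =>
      intro r ds hn hds
      have : r = [] := List.eq_nil_of_length_eq_zero (by omega)
      subst this
      rw [List.nil_append, pvFindAllB_nil, pvFindAllB_nil' (List.dropWhile_eq_nil_iff.mpr hds)]
  | succ n ih =>
      intro r ds hn hds
      have htkds : ds.takeWhile (fun x => !pvIsDelimB x) = [] := by
        cases ds with
        | nil => rfl
        | cons d ds' => simp [List.takeWhile_cons, hds d (by simp)]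
      have hdrds : ds.dropWhile (fun x => !pvIsDelimB x) = ds := by
        cases ds with
        | nil => rfl
        | cons d ds' => simp [List.dropWhile_cons, hds d (by simp)]
      cases hdr : r.dropWhile pvIsDelimB with
      | nil =>
          rw [pvFindAllB_nil' hdr, pvFindAllB_nil']
          rw [List.dropWhile_append, hdr]
          simp [List.dropWhile_eq_nil_iff.mpr hds]
      | cons c tl =>
          have hdra : (r ++ ds).dropWhile pvIsDelimB = c :: (tl ++ ds) := by
            rw [List.dropWhile_append, hdr]
            simp
          rw [pvFindAllB_cons hdr, pvFindAllB_cons hdra]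
          have hlen : tl.length < r.length := by
            have h1 : (r.dropWhile pvIsDelimB).length ≤ r.length := List.length_dropWhile_le _ _
            rw [hdr] at h1
            simp at h1
            omega
          cases hnd : tl.dropWhile (fun x => !pvIsDelimB x) with
          | nil =>
              have halltl : ∀ x ∈ tl, (fun x => !pvIsDelimB x) x = true :=
                List.dropWhile_eq_nil_iff.mp hnd
              have htk : (tl ++ ds).takeWhile (fun x => !pvIsDelimB x)
                  = tl ++ ds.takeWhile (fun x => !pvIsDelimB x) := pv_takeWhile_all ds halltl
              have hdrop : (tl ++ ds).dropWhile (fun x => !pvIsDelimB x)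
                  = ds.dropWhile (fun x => !pvIsDelimB x) := pv_dropWhile_all ds halltl
              rw [htk, htkds, hdrop, hdrds, pvFindAllB_nil,
                pvFindAllB_nil' (List.dropWhile_eq_nil_iff.mpr hds),
                List.takeWhile_eq_self_iff.mpr halltl]
              simp
          | cons x xs =>
              have hlt : (tl.takeWhile (fun x => !pvIsDelimB x)).length ≠ tl.length := by
                have := congrArg List.length
                  (List.takeWhile_append_dropWhile (p := fun x => !pvIsDelimB x) (l := tl))
                rw [hnd] at this
                simp at this
                omega
              have htk : (tl ++ ds).takeWhile (fun x => !pvIsDelimB x)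
                  = tl.takeWhile (fun x => !pvIsDelimB x) := by
                rw [List.takeWhile_append, if_neg hlt]
              have hdrop : (tl ++ ds).dropWhile (fun x => !pvIsDelimB x)
                  = tl.dropWhile (fun x => !pvIsDelimB x) ++ ds := by
                rw [List.dropWhile_append, if_neg (by rw [hnd]; simp)]
              rw [htk, hdrop, ih (tl.dropWhile (fun x => !pvIsDelimB x)) ds
                    (by have := List.length_dropWhile_le (fun x => !pvIsDelimB x) tl; omega) hds]
              rw [hnd]

-- on a non-empty string with no leading and no trailing delimiter, re.split = re.findall
theorem pv_split_eq_findall : ∀ (n : Nat) (l : List Char), l.length ≤ n →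
    (∀ z, l.getLast? = some z → pvIsDelimB z = false) →
    ∀ c tl, l = c :: tl → pvIsDelimB c = false →
    pvSplitB l = pvFindAllB l := by
  intro n
  induction n with
  | zero =>
      intro l hn _ c tl hl _
      rw [hl] at hn
      simp at hn
  | succ n ih =>
      intro l hn hlast c tl hl hc
      subst hl
      have hndc : (fun x => !pvIsDelimB x) c = true := by simp [hc]
      have hdw : (c :: tl).dropWhile (fun x => !pvIsDelimB x)
          = tl.dropWhile (fun x => !pvIsDelimB x) := by simp [List.dropWhile_cons, hndc]
      have hfa : pvFindAllB (c :: tl)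
          = (c :: tl.takeWhile (fun x => !pvIsDelimB x))
            :: pvFindAllB (tl.dropWhile (fun x => !pvIsDelimB x)) :=
        pvFindAllB_cons (by simp [List.dropWhile_cons, hc])
      have htw : (c :: tl).takeWhile (fun x => !pvIsDelimB x)
          = c :: tl.takeWhile (fun x => !pvIsDelimB x) := by simp [List.takeWhile_cons, hndc]
      cases hrest : tl.dropWhile (fun x => !pvIsDelimB x) with
      | nil =>
          rw [pvSplitB_nil (by rw [hdw, hrest]), htw, hfa, hrest, pvFindAllB_nil]
      | cons d tl2 =>
          have hd : pvIsDelimB d = true := by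
            have := pv_head_dropWhile hrest
            simpa using this
          rw [pvSplitB_cons (by rw [hdw, hrest]), htw, hfa, hrest]
          cases hr2 : tl2.dropWhile pvIsDelimB with
          | nil =>
              -- impossible: then d :: tl2 is all delimiters, but the last char of l is not
              exfalso
              have halldelim : ∀ x ∈ tl2, pvIsDelimB x = true := List.dropWhile_eq_nil_iff.mp hr2
              obtain ⟨z, hz, hzmem⟩ := pv_getLast?_some d tl2
              have hzl : (c :: tl).getLast? = some z := by
                apply pv_getLast?_suffix ?_ hz
                have s3 : d :: tl2 <:+ tl := by rw [← hrest]; exact List.dropWhile_suffix _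
                exact s3.trans (List.suffix_cons c tl)
              have hzfalse := hlast z hzl
              rcases List.mem_cons.mp hzmem with h | h
              · rw [h] at hzfalse; rw [hd] at hzfalse; simp at hzfalse
              · rw [halldelim z h] at hzfalse; simp at hzfalse
          | cons c2 t2 =>
              have hc2 : pvIsDelimB c2 = false := pv_head_dropWhile hr2
              have hlen1 : (d :: tl2).length ≤ tl.length := by
                have h0 := List.length_dropWhile_le (fun x => !pvIsDelimB x) tl
                rw [hrest] at h0
                exact h0
              have hsuff2 : c2 :: t2 <:+ c :: tl := by
                rw [← hr2]
                have s1 : tl2.dropWhile pvIsDelimB <:+ tl2 := List.dropWhile_suffix _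
                have s2 : tl2 <:+ d :: tl2 := List.suffix_cons d tl2
                have s3 : d :: tl2 <:+ tl := by rw [← hrest]; exact List.dropWhile_suffix _
                exact ((s1.trans s2).trans s3).trans (List.suffix_cons c tl)
              have hlast2 : ∀ z, (c2 :: t2).getLast? = some z → pvIsDelimB z = false :=
                fun z hz => hlast z (pv_getLast?_suffix hsuff2 hz)
              have hlen2 : (c2 :: t2).length ≤ n := by
                have h1 := List.length_dropWhile_le pvIsDelimB tl2
                rw [hr2] at h1
                have h3 : tl.length + 1 ≤ n + 1 := by simpa using hn
                have h4 : tl2.length + 1 ≤ tl.length := by simpa using hlen1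
                simp only [List.length_cons] at h1 ⊢
                omega
              rw [ih (c2 :: t2) hlen2 hlast2 c2 t2 rfl hc2]
              have hr2eq : pvFindAllB (d :: tl2) = pvFindAllB (c2 :: t2) := by
                apply pvFindAllB_congr
                rw [List.dropWhile_cons]
                simp only [hd, if_pos]
                rw [hr2]
                simp [List.dropWhile_cons, hc2]
              rw [hr2eq]

-- core lemma: B's pipeline on a non-empty string equals A's tokenization with its
-- leading empty token exactly when the string starts with a delimiter
theorem pv_alt_core (c : Char) (tl : List Char) :
    pvSplitB (pvRstripB (c :: tl))
      = if pvIsDelimB c then ([] : List Char) :: pvFindAllB (c :: tl) else pvFindAllB (c :: tl) := by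
  set l := c :: tl with hl
  have hsplit : l = pvRstripB l ++ (l.reverse.takeWhile pvIsDelimB).reverse := by
    conv_lhs => rw [← List.reverse_reverse l,
      ← List.takeWhile_append_dropWhile (p := pvIsDelimB) (l := l.reverse)]
    rw [List.reverse_append]
    rfl
  have hds : ∀ x ∈ (l.reverse.takeWhile pvIsDelimB).reverse, pvIsDelimB x = true := by
    intro x hx
    exact List.mem_takeWhile_imp (List.mem_reverse.mp hx)
  have hU : pvFindAllB l = pvFindAllB (pvRstripB l) := by
    conv_lhs => rw [hsplit]
    exact pv_findall_absorb (pvRstripB l).length (pvRstripB l) _ (le_refl _) hds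
  have hlastr : ∀ z, (pvRstripB l).getLast? = some z → pvIsDelimB z = false := by
    intro z hz
    rw [List.getLast?_eq_head?_reverse] at hz
    have hrev : (pvRstripB l).reverse = l.reverse.dropWhile pvIsDelimB := by
      rw [pvRstripB, List.reverse_reverse]
    rw [hrev] at hz
    cases hdw : l.reverse.dropWhile pvIsDelimB with
    | nil => rw [hdw] at hz; simp at hz
    | cons y ys =>
        rw [hdw] at hz
        simp at hz
        rw [← hz]
        exact pv_head_dropWhile hdw
  cases hr : pvRstripB l with
  | nil =>
      -- the whole string is delimiters: A returns [''], B splits '' into ['']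
      have hall : ∀ x ∈ l, pvIsDelimB x = true := by
        intro x hx
        rw [hsplit, hr, List.nil_append] at hx
        exact hds x hx
      have hc : pvIsDelimB c = true := hall c (by rw [hl]; simp)
      rw [if_pos hc, pvFindAllB_nil' (List.dropWhile_eq_nil_iff.mpr hall),
        pvSplitB_nil (by simp)]
      rfl
  | cons c2 t2 =>
      have hc2 : c2 = c := by
        have h0 := hsplit
        rw [hr] at h0
        rw [hl] at h0
        simp at h0
        exact h0.1.symm
      subst hc2
      rw [hr] at hU
      by_cases hc : pvIsDelimB c2 = true
      · -- leading delimiter: B's first segment is the empty token, as in A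
        rw [if_pos hc]
        have hdwr : (c2 :: t2).dropWhile (fun x => !pvIsDelimB x) = c2 :: t2 := by
          simp [List.dropWhile_cons, hc]
        have htwr : (c2 :: t2).takeWhile (fun x => !pvIsDelimB x) = [] := by
          simp [List.takeWhile_cons, hc]
        rw [pvSplitB_cons hdwr, htwr]
        have hfar : pvFindAllB (c2 :: t2) = pvFindAllB (t2.dropWhile pvIsDelimB) := by
          apply pvFindAllB_congr
          rw [List.dropWhile_cons]
          simp only [hc, if_pos]
          exact (pv_dropWhile_idem pvIsDelimB t2).symm
        cases hr2 : t2.dropWhile pvIsDelimB with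
        | nil =>
            exfalso
            have halldelim : ∀ x ∈ t2, pvIsDelimB x = true := List.dropWhile_eq_nil_iff.mp hr2
            obtain ⟨z, hz, hzmem⟩ := pv_getLast?_some c2 t2
            have hzfalse := hlastr z (by rw [hr]; exact hz)
            rcases List.mem_cons.mp hzmem with h | h
            · rw [h] at hzfalse; rw [hc] at hzfalse; simp at hzfalse
            · rw [halldelim z h] at hzfalse; simp at hzfalse
        | cons c3 t3 =>
            have hc3 : pvIsDelimB c3 = false := pv_head_dropWhile hr2
            have hsuff3 : c3 :: t3 <:+ c2 :: t2 := by
              rw [← hr2]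
              exact (List.dropWhile_suffix _).trans (List.suffix_cons c2 t2)
            have hlast3 : ∀ z, (c3 :: t3).getLast? = some z → pvIsDelimB z = false := by
              intro z hz
              exact hlastr z (by rw [hr]; exact pv_getLast?_suffix hsuff3 hz)
            rw [pv_split_eq_findall (c3 :: t3).length (c3 :: t3) (le_refl _) hlast3 c3 t3 rfl hc3]
            rw [hU, hfar, hr2]
      · -- no leading delimiter: B has no empty token, same as A
        rw [if_neg hc]
        have hcF : pvIsDelimB c2 = false := by simpa using hc
        have hlast2 : ∀ z, (c2 :: t2).getLast? = some z → pvIsDelimB z = false := by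
          intro z hz
          exact hlastr z (by rw [hr]; exact hz)
        rw [pv_split_eq_findall (c2 :: t2).length (c2 :: t2) (le_refl _) hlast2 c2 t2 rfl hcF]
        rw [hU]

-- ===== VERDICT (by name: the statement is the Claim_ definition above) =====
theorem split_into_words_spec : Claim_equal_split_into_words := by
  intro string _
  unfold Spec_split_into_words
  rw [portA_eq_F]
  cases h : string.toList with
  | nil =>
      have he : string = "" := String.toList_eq_nil_iff.mp h
      rw [pvF_nil, split_into_words_alt, if_pos he]
  | cons c tl =>
      have hne : ¬ string = "" := by
        intro e
        rw [e] at h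
        simp at h
      rw [split_into_words_alt, if_neg hne, h, pvF_cons, pv_alt_core c tl]
      by_cases hc : pvIsDelimB c = true
      · rw [if_pos hc, if_pos hc]
        simp
      · rw [if_neg hc, if_neg hc]
        simp
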